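-- pv_equiv track=rewrite | github.com/modsim/FluxML | apps/flux.py | cumulate
-- ===== SOURCE A (Python) =====
-- def log2(n):
-- 	"""computes the base 2 logarithm of argument n"""
-- 	l = 0
-- 	while n > 1:
-- 		n = n >> 1
-- 		l = l + 1
-- 	return l
--
-- def cumulate(v,d=1):
-- 	"""for d==1, performs the fast isotopopmer-to-cumomer transformation
-- 	on input vector v. For d==-1, performs the inverse transform, i.e.
-- 	transforms the given cumomer vector back into isotopomer space. It is
-- 	assumed that isPwr2(len(v))==True and that d is either 1 or -1."""
-- 	n = len(v)
-- 	ldm = log2(n)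
-- 	while ldm >= 1:
-- 		m = (1<<ldm)
-- 		mh = (m>>1)
-- 		for r in range(0,n,m):
-- 			for j in range(0,mh):
-- 				s = n-r-j-1
-- 				t = s-mh
-- 				v[t] = v[t] + d * v[s]
-- 		ldm = ldm-1
-- 	return v
-- ===== SOURCE B (Python) =====
-- def cumulate(v, d=1):
--     """Recursive divide-and-conquer form of the cumomer butterfly: combine the
--     lower half with d times the upper half, then transform each half.
--     Mutates v in place (via v[:] = ...) like A and returns it; return-value
--     equivalence with A is claimed for power-of-two lengths."""
--     def rec(w):
--         if len(w) < 2: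
--             return w
--         h = len(w) // 2
--         lo = [x + d * y for x, y in zip(w[:h], w[h:2*h])]
--         return rec(lo) + rec(w[h:])
--     v[:] = rec(v)
--     return v
-- ===== Notes on version B (the rewrite author's own statement) =====
-- stated objective: alternative
-- what changed: A's level-by-level iterative butterfly (outer while over levels, end-anchored index arithmetic with negative-index wraparound) is replaced by a recursive divide-and-conquer: combine the lower half with d times the upper half, then transform each half independently; Pre_ restricts to power-of-two lengths (the domain A's docstring itself assumes via isPwr2(len(v))) plus the identity cases d = 0 and all-zero vectors of any length — outside that, A's floor-log2 level count plus negative-index wraparound yields accidental values B does not reproduce.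
-- outside the precondition, e.g. on cumulate([1, 2, 3], 1): A returns [1, 5, 4], B returns [3, 5, 3]
import Mathlib
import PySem

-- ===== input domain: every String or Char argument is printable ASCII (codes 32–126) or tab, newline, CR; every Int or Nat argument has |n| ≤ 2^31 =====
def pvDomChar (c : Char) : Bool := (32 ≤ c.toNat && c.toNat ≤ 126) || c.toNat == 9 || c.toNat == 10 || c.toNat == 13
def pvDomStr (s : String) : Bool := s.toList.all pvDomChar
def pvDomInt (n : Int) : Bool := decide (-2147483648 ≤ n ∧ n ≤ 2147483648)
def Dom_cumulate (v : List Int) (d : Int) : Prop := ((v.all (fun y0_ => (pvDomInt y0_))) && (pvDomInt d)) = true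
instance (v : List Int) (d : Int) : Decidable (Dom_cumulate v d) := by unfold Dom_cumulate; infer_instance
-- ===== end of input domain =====

-- B replaces A's iterative level-by-level butterfly with a recursive divide-and-conquer over the
-- same recurrence (alternative decomposition, same cost); A mutates v in place -- the equivalence
-- proved here is about the return value (B mutates v to its own result via v[:] = ...).

-- ===== PORT A =====
-- helper log2(n): n is a Python int that is always a length (≥ 0) here, so Nat; n >> 1 = n / 2 exactly
def pyLog2 (n : Nat) : Nat :=
  if 1 < n then pyLog2 (n / 2) + 1 else 0

-- inner 'for j in range(0, mh)' loop of A; v[t] read/write via pyGetD/pySetD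
-- (exact: Python indices here are always within [-len, len), so no IndexError path is reachable)
def jFold (d n r mh : Int) (w : List Int) : List Int :=
  (PySem.List.pyRange 0 mh 1).foldl (fun acc j =>
    let s := n - r - j - 1
    let t := s - mh
    PySem.List.pySetD acc t (PySem.List.pyGetD acc t 0 + d * PySem.List.pyGetD acc s 0)) w

-- outer 'for r in range(0, n, m)' loop of A
def rFold (d n m mh : Int) (w : List Int) : List Int :=
  (PySem.List.pyRange 0 n m).foldl (fun acc r => jFold d n r mh acc) w

-- 'while ldm >= 1' loop of A; ldm is a nonnegative Python int, modelled as Nat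
def levelLoop (d n : Int) : Nat → List Int → List Int
  | 0, w => w
  | ldm+1, w =>
      let m : Int := (1 : Int) <<< (ldm + 1)
      let mh : Int := m >>> (1 : Nat)
      levelLoop d n ldm (rFold d n m mh w)

def cumulate (v : List Int) (d : Int) : List Int :=
  levelLoop d (v.length : Int) (pyLog2 v.length) v

-- ===== PORT B =====
-- rec(w): combine lower half with d * upper half, then recurse on each half
def cumRec (d : Int) (w : List Int) : List Int :=
  if w.length < 2 then w
  else
    let h := w.length / 2
    let lo := List.zipWith (fun x y => x + d * y) (w.take h) ((w.drop h).take h)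
    cumRec d lo ++ cumRec d (w.drop h)
termination_by w.length
decreasing_by
  · simp only [List.length_zipWith, List.length_take, List.length_drop]; omega
  · simp only [List.length_drop]; omega

def cumulate_alt (v : List Int) (d : Int) : List Int :=
  cumRec d v

-- ===== PRECONDITION & SPEC =====
-- Pre_ excludes lengths that are not powers of two (and A itself documents the assumption
-- isPwr2(len(v))): there A still returns, but via floor-log2 level choice and negative-index
-- wraparound, an accident of its end-anchored arithmetic that B does not reproduce.  (d = 0 and
-- all-zero vectors are admitted for every length: there the transform is the identity for both.)
def Pre_cumulate (v : List Int) (d : Int) : Prop :=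
  v.length = 0 ∨ v.length = 2 ^ (Nat.log2 v.length) ∨ d = 0 ∨ v = List.replicate v.length 0
instance (v : List Int) (d : Int) : Decidable (Pre_cumulate v d) := by
  unfold Pre_cumulate; infer_instance

def pvWitness_cumulate : List Int × Int := ([1, 2, 3, 4], 1)

def Spec_cumulate (v : List Int) (d : Int) (out : List Int) : Prop := out = cumulate_alt v d
instance (v : List Int) (d : Int) (out : List Int) : Decidable (Spec_cumulate v d out) := by
  unfold Spec_cumulate; infer_instance

-- ===== CLAIM (what is proved, stated in full; the proofs are below) =====
def Claim_equal_cumulate : Prop :=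
  ∀ (v : List Int) (d : Int), Dom_cumulate v d → Pre_cumulate v d →
    Spec_cumulate v d (cumulate v d)

-- ===== LEMMAS AND PROOFS =====

-- reference transform: one combine of the two halves, then each half independently
def specT (d : Int) : Nat → List Int → List Int
  | 0, w => w
  | k+1, w =>
      specT d k (List.zipWith (fun x y => x + d * y) (w.take (2^k)) (w.drop (2^k)))
        ++ specT d k (w.drop (2^k))

-- A's inner loop, unrolled from the high-j side: gFold … J applies the updates j = 0 … J-1
def gFold (d n r mh : Int) : Nat → List Int → List Int
  | 0, w => w
  | J+1, w =>
      let w' := gFold d n r mh J w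
      let s := n - r - (J : Int) - 1
      let t := s - mh
      PySem.List.pySetD w' t (PySem.List.pyGetD w' t 0 + d * PySem.List.pyGetD w' s 0)

-- A's outer loop by block count: blocks r = m*k, k = 0 … c-1
def bFold (d n m mh : Int) : Nat → List Int → List Int
  | 0, w => w
  | c+1, w => jFold d n (m * c) mh (bFold d n m mh c w)

theorem pyLog2_pow (k : Nat) : pyLog2 (2 ^ k) = k := by
  induction k with
  | zero => simp [pyLog2]
  | succ p ih =>
      rw [pyLog2]
      have h1 : 1 < 2 ^ (p+1) := Nat.one_lt_two_pow (by omega)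
      have h2 : 2 ^ (p+1) / 2 = 2 ^ p := by rw [pow_succ]; omega
      simp [h1, h2, ih]

theorem length_jFold (d n r mh : Int) (w : List Int) :
    (jFold d n r mh w).length = w.length := by
  unfold jFold
  generalize PySem.List.pyRange 0 mh 1 = l
  induction l generalizing w with
  | nil => rfl
  | cons a l ih => simp only [List.foldl_cons]; rw [ih]; simp [PySem.List.length_pySetD]

theorem jFold_shift (d n r mh : Int) (w : List Int) :
    jFold d n r mh w = jFold d (n - r) 0 mh w := by
  unfold jFold
  congr 1
  funext acc j
  ring_nf

theorem jFold_eq_gFold (d n r mh : Int) (hmh : 0 ≤ mh) (w : List Int) :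
    jFold d n r mh w = gFold d n r mh mh.toNat w := by
  unfold jFold
  rw [PySem.List.pyRange_one, List.foldl_map]
  have h0 : (mh - 0).toNat = mh.toNat := by omega
  rw [h0]
  generalize mh.toNat = J
  induction J generalizing w with
  | zero => rfl
  | succ p ih =>
      rw [List.range_succ, List.foldl_append, ih]
      simp [gFold]

theorem getAt2 (L u z : List Int) (b : Int) (i : Int)
    (hL : L = u ++ b :: z) (hi : i = (u.length : Int)) :
    PySem.List.pyGetD L i 0 = b := by
  subst hL hi
  rw [PySem.List.pyGetD_natCast]
  simp [List.getD_eq_getElem?_getD]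

theorem setAt2 (L u z : List Int) (a v : Int) (i : Int)
    (hL : L = u ++ a :: z) (hi : i = (u.length : Int)) :
    PySem.List.pySetD L i v = u ++ v :: z := by
  subst hL hi
  rw [PySem.List.pySetD_natCast]
  simp

theorem gFold_closed (d n r : Int) :
    ∀ (J : Nat) (x1 x2 y1 y2 p q : List Int) (mh : Int)
      (hx2 : x2.length = J) (hy2 : y2.length = J)
      (hx1y1 : x1.length = y1.length)
      (hmh : mh = (x1.length : Int) + J)
      (hp : (p.length : Int) = n - r - 2 * mh),
      gFold d n r mh J (p ++ (x1 ++ x2) ++ (y1 ++ y2) ++ q)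
        = p ++ (x1 ++ List.zipWith (fun a b => a + d * b) x2 y2) ++ (y1 ++ y2) ++ q := by
  intro J
  induction J with
  | zero =>
      intro x1 x2 y1 y2 p q mh hx2 hy2 _ _ _
      rw [List.length_eq_zero_iff] at hx2 hy2
      subst hx2 hy2
      simp [gFold]
  | succ J ih =>
      intro x1 x2 y1 y2 p q mh hx2 hy2 hx1y1 hmh hp
      rcases x2 with _ | ⟨a, x2'⟩; · simp at hx2
      rcases y2 with _ | ⟨b, y2'⟩; · simp at hy2
      simp only [List.length_cons, Nat.succ.injEq] at hx2 hy2
      simp only [gFold]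
      have hre : p ++ (x1 ++ a :: x2') ++ (y1 ++ b :: y2') ++ q
          = p ++ ((x1 ++ [a]) ++ x2') ++ ((y1 ++ [b]) ++ y2') ++ q := by
        simp
      rw [hre, ih (x1 ++ [a]) x2' (y1 ++ [b]) y2' p q mh hx2 hy2
        (by simp [hx1y1]) (by simp; push_cast at hmh ⊢; omega) hp]
      have hca : (n - r - (J:Int) - 1) - mh = ((p ++ x1).length : Int) := by
        push_cast [List.length_append]
        push_cast at hmh hp
        omega
      have hcb : (n - r - (J:Int) - 1)
          = (((p ++ (x1 ++ [a] ++ List.zipWith (fun a b => a + d * b) x2' y2') ++ y1)).length : Int) := by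
        push_cast at hmh hp
        simp [hx2, hy2]
        omega
      rw [getAt2 (p ++ (x1 ++ [a] ++ List.zipWith (fun a b => a + d * b) x2' y2') ++ (y1 ++ [b] ++ y2') ++ q)
            (p ++ x1)
            (List.zipWith (fun a b => a + d * b) x2' y2' ++ (y1 ++ [b] ++ y2') ++ q) a
            ((n - r - (J:Int) - 1) - mh) (by simp) hca]
      rw [getAt2 (p ++ (x1 ++ [a] ++ List.zipWith (fun a b => a + d * b) x2' y2') ++ (y1 ++ [b] ++ y2') ++ q)
            (p ++ (x1 ++ [a] ++ List.zipWith (fun a b => a + d * b) x2' y2') ++ y1)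
            (y2' ++ q) b (n - r - (J:Int) - 1) (by simp) hcb]
      rw [setAt2 (p ++ (x1 ++ [a] ++ List.zipWith (fun a b => a + d * b) x2' y2') ++ (y1 ++ [b] ++ y2') ++ q)
            (p ++ x1)
            (List.zipWith (fun a b => a + d * b) x2' y2' ++ (y1 ++ [b] ++ y2') ++ q)
            a (a + d * b) ((n - r - (J:Int) - 1) - mh) (by simp) hca]
      simp

-- the full inner block: the lower mh elements x become x + d*y, the upper mh elements y are untouched
theorem jFold_closed (d n r : Int) (mh : Int) (p x y q : List Int)
    (hx : (x.length : Int) = mh) (hy : (y.length : Int) = mh)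
    (hp : (p.length : Int) = n - r - 2 * mh) :
    jFold d n r mh (p ++ x ++ y ++ q)
      = p ++ List.zipWith (fun a b => a + d * b) x y ++ y ++ q := by
  rw [jFold_eq_gFold d n r mh (by omega) _]
  have h := gFold_closed d n r mh.toNat [] x [] y p q mh (by omega) (by omega) rfl
    (by simp; omega) hp
  simpa using h

theorem jFold_append_right (d n r mh : Int) (A B : List Int) (hmh : 0 ≤ mh)
    (h1 : (A.length : Int) ≤ n - r - 2 * mh) (h2 : n - r ≤ (A.length : Int) + B.length) :
    jFold d n r mh (A ++ B) = A ++ jFold d (n - A.length) r mh B := by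
  set i1 : Nat := (n - r - 2*mh - A.length).toNat with hi1
  set p' := B.take i1 with hp'
  set x := (B.drop i1).take mh.toNat with hxd
  set y := ((B.drop i1).drop mh.toNat).take mh.toNat with hyd
  set q := ((B.drop i1).drop mh.toNat).drop mh.toNat with hqd
  have hB : B = p' ++ (x ++ (y ++ q)) := by
    rw [hp', hxd, hyd, hqd]
    simp [List.take_append_drop]
  have hlB : i1 + mh.toNat + mh.toNat ≤ B.length := by omega
  have hlp : (p'.length : Int) = n - r - 2*mh - A.length := by
    rw [hp']; simp; omega
  have hlx : (x.length : Int) = mh := by rw [hxd]; simp; omega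
  have hly : (y.length : Int) = mh := by rw [hyd]; simp; omega
  have e1 : A ++ B = (A ++ p') ++ x ++ y ++ q := by rw [hB]; simp
  have e2 : B = p' ++ x ++ y ++ q := by rw [hB]; simp
  rw [e1, jFold_closed d n r mh (A ++ p') x y q hlx hly (by simp only [List.length_append]; push_cast; omega)]
  rw [e2, jFold_closed d (n - A.length) r mh p' x y q hlx hly (by omega)]
  simp

theorem jFold_append_left (d n r mh : Int) (A B : List Int) (hmh : 0 ≤ mh)
    (h1 : 0 ≤ n - r - 2 * mh) (h2 : n - r ≤ (A.length : Int)) :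
    jFold d n r mh (A ++ B) = jFold d n r mh A ++ B := by
  set t0 : Nat := (n - r - 2*mh).toNat with ht0
  set p := A.take t0 with hpd
  set x := (A.drop t0).take mh.toNat with hxd
  set y := ((A.drop t0).drop mh.toNat).take mh.toNat with hyd
  set q := ((A.drop t0).drop mh.toNat).drop mh.toNat with hqd
  have hA : A = p ++ (x ++ (y ++ q)) := by
    rw [hpd, hxd, hyd, hqd]; simp [List.take_append_drop]
  have hlA : t0 + mh.toNat + mh.toNat ≤ A.length := by omega
  have hlp : (p.length : Int) = n - r - 2*mh := by rw [hpd]; simp; omega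
  have hlx : (x.length : Int) = mh := by rw [hxd]; simp; omega
  have hly : (y.length : Int) = mh := by rw [hyd]; simp; omega
  have e1 : A ++ B = p ++ x ++ y ++ (q ++ B) := by rw [hA]; simp
  have e2 : A = p ++ x ++ y ++ q := by rw [hA]; simp
  rw [e1, jFold_closed d n r mh p x y (q ++ B) hlx hly hlp]
  rw [e2, jFold_closed d n r mh p x y q hlx hly hlp]
  simp

theorem length_bFold (d n m mh : Int) (c : Nat) (w : List Int) :
    (bFold d n m mh c w).length = w.length := by
  induction c with
  | zero => rfl
  | succ p ih => rw [bFold, length_jFold, ih]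

theorem rFold_eq_bFold (d n m mh : Int) (hm : 0 < m) (hdvd : m ∣ n) (hn : 0 ≤ n)
    (w : List Int) : rFold d n m mh w = bFold d n m mh (n / m).toNat w := by
  unfold rFold
  rw [PySem.List.pyRange_of_pos 0 n hm]
  have hcnt : (if (0:Int) < n then ((n - 0 + m - 1) / m).toNat else 0) = (n / m).toNat := by
    rcases hdvd with ⟨q, rfl⟩
    by_cases h0 : (0:Int) < m * q
    · simp only [h0, if_pos]
      have he : m * q - 0 + m - 1 = (m - 1) + q * m := by ring
      rw [he, Int.add_mul_ediv_right _ _ (by omega : m ≠ 0),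
        Int.ediv_eq_zero_of_lt (by omega) (by omega),
        Int.mul_ediv_cancel_left _ (by omega : m ≠ 0)]
      omega
    · have hq : m * q = 0 := by omega
      simp [hq]
  rw [hcnt, List.foldl_map]
  generalize (n / m).toNat = c
  induction c generalizing w with
  | zero => rfl
  | succ p ih =>
      rw [List.range_succ, List.foldl_append, ih]
      simp [bFold]

-- phase 1: blocks k < c1 lie end-anchored inside the right part B
theorem bFold_right (d n m mh : Int) (hmh0 : 0 ≤ mh) (hm2 : m = 2 * mh)
    (A B : List Int) (c1 : Nat)
    (hc1 : (A.length : Int) + m * c1 ≤ n) (hlen : n ≤ (A.length : Int) + B.length) :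
    bFold d n m mh c1 (A ++ B) = A ++ bFold d (n - A.length) m mh c1 B := by
  induction c1 with
  | zero => rfl
  | succ p ih =>
      have he : m * (((p:Nat) + 1 : Nat) : Int) = m * p + m := by push_cast; ring
      rw [he] at hc1
      have hmp : 0 ≤ m * (p:Int) := mul_nonneg (by omega) (by positivity)
      rw [bFold, ih (by omega), bFold,
        jFold_append_right d n (m * p) mh A _ hmh0
          (by omega)
          (by rw [length_bFold]; omega)]

-- phase 2: blocks k ∈ [c1, c1+c2) lie end-anchored inside the left part A
theorem bFold_split (d n m mh : Int) (hmh0 : 0 ≤ mh) (hm2 : m = 2 * mh)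
    (A B : List Int) (c1 c2 : Nat)
    (hA : (A.length : Int) = n - m * c1) (hlen : n ≤ (A.length : Int) + B.length)
    (hc2 : m * c2 ≤ (A.length : Int)) :
    bFold d n m mh (c1 + c2) (A ++ B)
      = bFold d (A.length) m mh c2 A ++ bFold d (n - A.length) m mh c1 B := by
  induction c2 with
  | zero =>
      rw [Nat.add_zero, bFold_right d n m mh hmh0 hm2 A B c1 (by omega) hlen]
      rfl
  | succ p ih =>
      have he1 : m * (((p:Nat) + 1 : Nat) : Int) = m * p + m := by push_cast; ring
      rw [he1] at hc2
      have he2 : m * (((c1 + p : Nat) : Nat) : Int) = m * c1 + m * p := by push_cast; ring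
      have hmp : 0 ≤ m * (p:Int) := mul_nonneg (by omega) (by positivity)
      have hmc : 0 ≤ m * (c1:Int) := mul_nonneg (by omega) (by positivity)
      rw [show c1 + (p + 1) = (c1 + p) + 1 from rfl, bFold,
        ih (by omega), bFold,
        jFold_append_left d n (m * ((c1 + p : Nat) : Int)) mh _ _ hmh0
          (by rw [he2]; omega)
          (by rw [length_bFold, he2]; omega)]
      congr 1
      rw [jFold_shift d n _ mh, jFold_shift d (A.length:Int) (m * p) mh,
        show n - m * ((c1 + p : Nat) : Int) = (A.length : Int) - m * p by rw [he2]; omega]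

theorem shiftl_eq (k : Nat) : (1 : Int) <<< k = 2 ^ k := by simp [Int.shiftLeft_eq]

theorem shiftr_eq (p : Nat) : ((2:Int) ^ (p+1)) >>> (1:Nat) = 2 ^ p := by
  rw [Int.shiftRight_eq_div_pow, pow_succ]; omega

theorem pow_div_toNat (a b : Nat) (h : b ≤ a) : ((2:Int)^a / 2^b).toNat = 2^(a-b) := by
  have h1 : (2:Int)^a = 2^b * 2^(a-b) := by rw [← pow_add]; congr 1; omega
  rw [h1, Int.mul_ediv_cancel_left _ (by positivity : (0:Int) < 2^b).ne',
    show ((2:Int)^(a-b)) = ((2^(a-b):Nat) : Int) by push_cast; ring, Int.toNat_natCast]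

theorem levelLoop_split (d : Int) (k : Nat) :
    ∀ (j : Nat), j ≤ k → ∀ (A B : List Int), A.length = 2 ^ k → B.length = 2 ^ k →
      levelLoop d (2 ^ (k+1)) j (A ++ B)
        = levelLoop d (2 ^ k) j A ++ levelLoop d (2 ^ k) j B := by
  intro j
  induction j with
  | zero => intro _ A B _ _; rfl
  | succ p ih =>
      intro hpk A B hA hB
      rw [levelLoop, levelLoop, levelLoop, shiftl_eq, shiftr_eq]
      have hm : (0:Int) < 2 ^ (p+1) := by positivity
      rw [rFold_eq_bFold d _ _ _ hm (pow_dvd_pow 2 (by omega)) (by positivity) (A ++ B),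
          rFold_eq_bFold d _ _ _ hm (pow_dvd_pow 2 (by omega)) (by positivity) A,
          rFold_eq_bFold d _ _ _ hm (pow_dvd_pow 2 (by omega)) (by positivity) B,
          pow_div_toNat (k+1) (p+1) (by omega), pow_div_toNat k (p+1) (by omega),
          show (2:Nat)^((k+1)-(p+1)) = 2^(k-(p+1)) + 2^(k-(p+1)) by
            rw [show (k+1)-(p+1) = (k-(p+1))+1 by omega, pow_succ]; omega]
      have hI1 : ((2:Int) ^ (p+1)) * ((2^(k-(p+1)) : Nat) : Int) = 2^k := by
        push_cast; rw [← pow_add]; congr 1; omega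
      have hAI : ((A.length : Nat) : Int) = 2^k := by rw [hA]; push_cast; ring
      have hBI : ((B.length : Nat) : Int) = 2^k := by rw [hB]; push_cast; ring
      have h3 : (2:Int)^(k+1) = 2^k + 2^k := by rw [pow_succ]; ring
      rw [bFold_split d (2^(k+1)) (2^(p+1)) (2^p) (by positivity)
          (by rw [pow_succ]; ring) A B (2^(k-(p+1))) (2^(k-(p+1)))
          (by omega) (by omega) (by omega),
        hAI, show (2:Int)^(k+1) - 2^k = 2^k by omega,
        ih (by omega) _ _ (by rw [length_bFold]; exact hA) (by rw [length_bFold]; exact hB)]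

theorem levelLoop_eq_specT (d : Int) :
    ∀ (k : Nat) (w : List Int), w.length = 2 ^ k →
      levelLoop d (2 ^ k) k w = specT d k w := by
  intro k
  induction k with
  | zero => intro w _; rfl
  | succ p ih =>
      intro w hw
      have h2 : (2:Nat)^(p+1) = 2^p + 2^p := by rw [pow_succ]; omega
      rw [levelLoop, shiftl_eq, shiftr_eq]
      have hm : (0:Int) < 2 ^ (p+1) := by positivity
      rw [rFold_eq_bFold d _ _ _ hm dvd_rfl (by positivity) w,
        show ((2:Int)^(p+1) / 2^(p+1)).toNat = 1 by rw [Int.ediv_self hm.ne']; rfl,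
        bFold, bFold,
        show ((2:Int)^(p+1)) * ((0:Nat):Int) = 0 by simp]
      have htkN : (w.take (2^p)).length = 2^p := by rw [List.length_take, hw]; omega
      have hdkN : (w.drop (2^p)).length = 2^p := by rw [List.length_drop, hw]; omega
      have htk : ((w.take (2^p)).length : Int) = 2^p := by rw [htkN]; push_cast; ring
      have hdk : ((w.drop (2^p)).length : Int) = 2^p := by rw [hdkN]; push_cast; ring
      nth_rewrite 1 [show w = [] ++ w.take (2^p) ++ (w.drop (2^p)) ++ [] by simp]
      rw [jFold_closed d (2^(p+1)) 0 (2^p) [] (w.take (2^p)) (w.drop (2^p)) [] htk hdk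
          (by simp; rw [pow_succ]; ring)]
      simp only [List.nil_append, List.append_nil]
      have hzw : (List.zipWith (fun a b => a + d * b) (w.take (2^p)) (w.drop (2^p))).length
          = 2^p := by rw [List.length_zipWith, htkN, hdkN]; omega
      rw [levelLoop_split d p p le_rfl _ _ hzw hdkN, ih _ hzw, ih _ hdkN]
      rfl

theorem cumRec_eq_specT (d : Int) :
    ∀ (k : Nat) (w : List Int), w.length = 2 ^ k → cumRec d w = specT d k w := by
  intro k
  induction k with
  | zero =>
      intro w hw
      rw [cumRec, if_pos (by omega)]
      rfl
  | succ p ih =>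
      intro w hw
      have h2 : (2:Nat)^(p+1) = 2^p + 2^p := by rw [pow_succ]; omega
      have hlt : ¬ (w.length < 2) := by
        rw [hw]; have := Nat.one_lt_two_pow (n := p+1) (by omega); omega
      rw [cumRec, if_neg hlt]
      show cumRec d (List.zipWith (fun x y => x + d * y)
          (w.take (w.length / 2)) ((w.drop (w.length / 2)).take (w.length / 2)))
        ++ cumRec d (w.drop (w.length / 2)) = specT d (p+1) w
      have hh : w.length / 2 = 2 ^ p := by rw [hw]; omega
      rw [hh]
      have hdkN : (w.drop (2^p)).length = 2^p := by rw [List.length_drop, hw]; omega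
      have hdt : (w.drop (2^p)).take (2^p) = w.drop (2^p) :=
        List.take_of_length_le (by omega)
      rw [hdt]
      have htkN : (w.take (2^p)).length = 2^p := by rw [List.length_take, hw]; omega
      have hzw : (List.zipWith (fun x y => x + d * y) (w.take (2^p)) (w.drop (2^p))).length
          = 2^p := by rw [List.length_zipWith, htkN, hdkN]; omega
      rw [ih _ hzw, ih _ hdkN]
      rfl

-- ===== trivial cases: d = 0, or an all-zero vector (every update writes back what is there) =====

theorem pySetD_getD_self (w : List Int) (i : Int) :
    PySem.List.pySetD w i (PySem.List.pyGetD w i 0) = w := by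
  unfold PySem.List.pySetD PySem.List.pySet? PySem.List.pyGetD PySem.List.pyGet? PySem.List.pyIdx?
  split_ifs with h1 h2 h3
  · simp [List.getElem?_eq_getElem (show i.toNat < w.length by omega), List.set_getElem_self]
  · simp
  · simp [List.getElem?_eq_getElem (show w.length - (-i).toNat < w.length by omega),
      List.set_getElem_self]
  · simp

theorem pyGetD_all_zero (w : List Int) (hw : ∀ x ∈ w, x = (0:Int)) (i : Int) :
    PySem.List.pyGetD w i 0 = 0 := by
  unfold PySem.List.pyGetD PySem.List.pyGet? PySem.List.pyIdx?
  split_ifs with h1 h2 h3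
  · simp [List.getElem?_eq_getElem (show i.toNat < w.length by omega)]
    exact hw _ (List.getElem_mem _)
  · simp
  · simp [List.getElem?_eq_getElem (show w.length - (-i).toNat < w.length by omega)]
    exact hw _ (List.getElem_mem _)
  · simp

theorem step_triv (d n r mh j : Int) (w : List Int) (H : d = 0 ∨ ∀ x ∈ w, x = (0:Int)) :
    PySem.List.pySetD w (n - r - j - 1 - mh)
      (PySem.List.pyGetD w (n - r - j - 1 - mh) 0 + d * PySem.List.pyGetD w (n - r - j - 1) 0)
      = w := by
  rcases H with rfl | hz
  · rw [zero_mul, add_zero, pySetD_getD_self]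
  · rw [pyGetD_all_zero w hz (n - r - j - 1 - mh), pyGetD_all_zero w hz (n - r - j - 1),
      show (0:Int) + d * 0 = 0 by ring,
      show (0:Int) = PySem.List.pyGetD w (n - r - j - 1 - mh) 0 from
        (pyGetD_all_zero w hz _).symm, pySetD_getD_self]

theorem jFold_triv (d n r mh : Int) (w : List Int) (H : d = 0 ∨ ∀ x ∈ w, x = (0:Int)) :
    jFold d n r mh w = w := by
  unfold jFold
  generalize PySem.List.pyRange 0 mh 1 = l
  induction l with
  | nil => rfl
  | cons a l ih => simp only [List.foldl_cons]; rw [step_triv d n r mh a w H, ih]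

theorem rFold_triv (d n m mh : Int) (w : List Int) (H : d = 0 ∨ ∀ x ∈ w, x = (0:Int)) :
    rFold d n m mh w = w := by
  unfold rFold
  generalize PySem.List.pyRange 0 n m = l
  induction l with
  | nil => rfl
  | cons a l ih => simp only [List.foldl_cons]; rw [jFold_triv d n a mh w H, ih]

theorem levelLoop_triv (d n : Int) (ldm : Nat) (w : List Int)
    (H : d = 0 ∨ ∀ x ∈ w, x = (0:Int)) : levelLoop d n ldm w = w := by
  induction ldm with
  | zero => rfl
  | succ p ih => rw [levelLoop, rFold_triv _ _ _ _ w H, ih]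

theorem zipWith_triv (d : Int) :
    ∀ (a b : List Int), a.length ≤ b.length → (d = 0 ∨ ∀ x ∈ b, x = (0:Int)) →
      List.zipWith (fun x y => x + d * y) a b = a := by
  intro a
  induction a with
  | nil => intro b _ _; rfl
  | cons x a ih =>
      intro b hlen H
      rcases b with _ | ⟨y, b⟩
      · simp at hlen
      · have hy : x + d * y = x := by
          rcases H with rfl | hz
          · ring
          · rw [hz y (by simp)]; ring
        simp only [List.zipWith_cons_cons, hy]
        rw [ih b (by simpa using hlen)
          (by rcases H with rfl | hz; · exact Or.inl rfl
              · exact Or.inr fun x hx => hz x (List.mem_cons_of_mem _ hx))]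

theorem cumRec_triv (d : Int) :
    ∀ (N : Nat) (w : List Int), w.length ≤ N → (d = 0 ∨ ∀ x ∈ w, x = (0:Int)) →
      cumRec d w = w := by
  intro N
  induction N with
  | zero =>
      intro w hw _
      rw [cumRec, if_pos (by omega)]
  | succ N ih =>
      intro w hw H
      by_cases hlt : w.length < 2
      · rw [cumRec, if_pos hlt]
      · rw [cumRec, if_neg hlt]
        show cumRec d (List.zipWith (fun x y => x + d * y)
            (w.take (w.length / 2)) ((w.drop (w.length / 2)).take (w.length / 2)))
          ++ cumRec d (w.drop (w.length / 2)) = w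
        have Hd : d = 0 ∨ ∀ x ∈ (w.drop (w.length / 2)).take (w.length / 2), x = (0:Int) := by
          rcases H with rfl | hz
          · exact Or.inl rfl
          · exact Or.inr fun x hx => hz x (List.mem_of_mem_drop (List.mem_of_mem_take hx))
        rw [zipWith_triv d _ _ (by simp; omega) Hd]
        have H1 : d = 0 ∨ ∀ x ∈ w.take (w.length / 2), x = (0:Int) := by
          rcases H with rfl | hz
          · exact Or.inl rfl
          · exact Or.inr fun x hx => hz x (List.mem_of_mem_take hx)
        have H2 : d = 0 ∨ ∀ x ∈ w.drop (w.length / 2), x = (0:Int) := by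
          rcases H with rfl | hz
          · exact Or.inl rfl
          · exact Or.inr fun x hx => hz x (List.mem_of_mem_drop hx)
        rw [ih _ (by simp; omega) H1, ih _ (by simp; omega) H2, List.take_append_drop]

-- ===== VERDICT (by name: the statement is the Claim_ definition above) =====
theorem cumulate_spec : Claim_equal_cumulate := by
  intro v d _ hpre
  unfold Spec_cumulate cumulate cumulate_alt
  rcases hpre with h0 | hpow | hd | hz
  · rw [List.length_eq_zero_iff] at h0
    subst h0
    simp [cumRec, levelLoop, pyLog2]
  · set k := v.length.log2 with hk
    have hlog : pyLog2 v.length = k := by rw [hpow, pyLog2_pow]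
    have hI : ((v.length : Nat) : Int) = ((2:Int))^k := by rw [hpow]; push_cast; ring
    rw [hlog, hI, levelLoop_eq_specT d k v hpow, cumRec_eq_specT d k v hpow]
  · rw [levelLoop_triv _ _ _ v (Or.inl hd), cumRec_triv d v.length v le_rfl (Or.inl hd)]
  · have hz' : ∀ x ∈ v, x = (0:Int) := by
      intro x hx; rw [hz] at hx; exact List.eq_of_mem_replicate hx
    rw [levelLoop_triv _ _ _ v (Or.inr hz'), cumRec_triv d v.length v le_rfl (Or.inr hz')]
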